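-- pv_equiv track=rewrite | github.com/pg56714/onlinejudgePractice | code/P12.py | max_depth_of_nested_braces
-- ===== SOURCE A (Python) =====
-- def max_depth_of_nested_braces(input_str):
--     current_depth = 0
--     max_depth = 0
--
--     for char in input_str:
--         if char == "{":
--             current_depth += 1
--             max_depth = max(max_depth, current_depth)
--         elif char == "}":
--             current_depth -= 1
--             if current_depth < 0:
--                 return -1
--
--     if current_depth != 0:
--         return -1
--
--     return max_depth
-- ===== SOURCE B (Python) =====
-- def max_depth_of_nested_braces(input_str):
--     depths = [0]
--     for c in input_str:
--         depths.append(depths[-1] + (1 if c == "{" else -1 if c == "}" else 0))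
--     if min(depths) < 0 or depths[-1] != 0:
--         return -1
--     return max(depths)
-- ===== Notes on version B (the rewrite author's own statement) =====
-- stated objective: alternative
-- what changed: A tracks depth and running maximum with early return inside one loop; B first materialises the full running-depth sequence (prefix sums of +1/-1/0 deltas), then decides unbalancedness by min<0 or nonzero last element and returns max of the sequence.
import Mathlib
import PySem

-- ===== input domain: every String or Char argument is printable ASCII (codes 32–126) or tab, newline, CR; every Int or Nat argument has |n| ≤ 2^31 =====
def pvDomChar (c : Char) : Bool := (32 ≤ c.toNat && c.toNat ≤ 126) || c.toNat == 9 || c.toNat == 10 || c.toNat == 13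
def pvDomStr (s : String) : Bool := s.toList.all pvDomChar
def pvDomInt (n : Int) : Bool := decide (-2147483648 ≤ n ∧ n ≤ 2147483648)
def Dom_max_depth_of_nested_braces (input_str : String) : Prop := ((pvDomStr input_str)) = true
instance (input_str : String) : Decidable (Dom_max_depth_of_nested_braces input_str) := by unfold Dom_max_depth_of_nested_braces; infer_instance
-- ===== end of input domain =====

-- B re-implements A by materialising the full running-depth sequence and reducing it
-- with min/max instead of tracking depth and maximum with early return inside one loop
-- (objective: alternative decomposition, same cost).

-- ===== PORT A =====
-- the loop with early return on underflow, then the final balance check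
def pvGoA : List Char → Int → Int → Int
  | [], current_depth, max_depth => if current_depth ≠ 0 then -1 else max_depth
  | c :: cs, current_depth, max_depth =>
      if c = '{' then
        pvGoA cs (current_depth + 1) (max max_depth (current_depth + 1))
      else if c = '}' then
        if current_depth - 1 < 0 then -1 else pvGoA cs (current_depth - 1) max_depth
      else
        pvGoA cs current_depth max_depth

def max_depth_of_nested_braces (input_str : String) : Int :=
  pvGoA input_str.toList 0 0

-- ===== PORT B =====
-- depths = running prefix sums of the +1/-1/0 deltas, starting at 0
def pvDelta (c : Char) : Int := if c = '{' then 1 else if c = '}' then -1 else 0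

def max_depth_of_nested_braces_alt (input_str : String) : Int :=
  let depths := List.scanl (fun a c => a + pvDelta c) 0 input_str.toList
  -- depths is nonempty (it starts with 0), so min(depths)/max(depths) = foldl from 0
  if depths.foldl min 0 < 0 ∨ depths.getLast?.getD 0 ≠ 0 then -1
  else depths.foldl max 0

-- ===== PRECONDITION & SPEC =====
def Spec_max_depth_of_nested_braces (input_str : String) (out : Int) : Prop := out = max_depth_of_nested_braces_alt input_str
instance (input_str : String) (out : Int) : Decidable (Spec_max_depth_of_nested_braces input_str out) := by unfold Spec_max_depth_of_nested_braces; infer_instance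

-- ===== CLAIM (what is proved, stated in full; the proofs are below) =====
def Claim_equal_max_depth_of_nested_braces : Prop := ∀ (input_str : String), Dom_max_depth_of_nested_braces input_str → Spec_max_depth_of_nested_braces input_str (max_depth_of_nested_braces input_str)

-- ===== LEMMAS AND PROOFS =====

lemma foldl_min_le_init (l : List Int) (a : Int) : l.foldl min a ≤ a := by
  induction l generalizing a with
  | nil => simp
  | cons x t ih => exact le_trans (ih (min a x)) (min_le_left a x)

lemma foldl_min_neg_iff (l : List Int) (a : Int) :
    l.foldl min a < 0 ↔ a < 0 ∨ ∃ x ∈ l, x < 0 := by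
  induction l generalizing a with
  | nil => simp
  | cons x t ih =>
    simp only [List.foldl_cons, ih, List.mem_cons]
    constructor
    · rintro (h | ⟨y, hy, hylt⟩)
      · rcases lt_or_ge a 0 with h' | h'
        · exact Or.inl h'
        · exact Or.inr ⟨x, Or.inl rfl, by omega⟩
      · exact Or.inr ⟨y, Or.inr hy, hylt⟩
    · rintro (h | ⟨y, rfl | hy, hylt⟩)
      · exact Or.inl (by omega)
      · exact Or.inl (by omega)
      · exact Or.inr ⟨y, hy, hylt⟩

-- two nonnegative seeds give the same "some running depth is negative" test
lemma foldl_min_neg_congr (l : List Int) (a b : Int) (ha : 0 ≤ a) (hb : 0 ≤ b) :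
    (l.foldl min a < 0 ↔ l.foldl min b < 0) := by
  rw [foldl_min_neg_iff, foldl_min_neg_iff]
  have h1 : ¬ a < 0 := by omega
  have h2 : ¬ b < 0 := by omega
  tauto

lemma scanl_getLast?_cons (f : Int → Char → Int) (a : Int) (c : Char) (cs : List Char) :
    (List.scanl f a (c :: cs)).getLast?.getD 0 = (List.scanl f (f a c) cs).getLast?.getD 0 := by
  rw [List.scanl_cons]
  cases cs with
  | nil => simp
  | cons x t => rw [List.scanl_cons]; simp [List.getLast?_cons_cons]

-- the seed of a scanl is its head, so folding max from m or from max m a is the same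
lemma foldl_max_scanl_seed (f : Int → Char → Int) (a m : Int) (t : List Char) :
    (List.scanl f a t).foldl max m = (List.scanl f a t).foldl max (max m a) := by
  cases t <;> simp [List.foldl_cons]

-- the fold-min over a scanl never exceeds the seed
lemma foldl_min_scanl_seed_le (f : Int → Char → Int) (a m : Int) (t : List Char) :
    (List.scanl f a t).foldl min m ≤ a := by
  cases t with
  | nil => simp
  | cons x u =>
    rw [List.scanl_cons, List.foldl_cons]
    exact le_trans (foldl_min_le_init _ _) (min_le_right m a)

-- main loop invariant: A's loop over cs from (cd, md) equals B's reduction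
-- of the depth sequence scanned from cd, provided 0 ≤ cd ≤ md
lemma goA_eq (cs : List Char) : ∀ (cd md : Int), 0 ≤ cd → cd ≤ md →
    pvGoA cs cd md =
      (if (List.scanl (fun a c => a + pvDelta c) cd cs).foldl min cd < 0 ∨
          (List.scanl (fun a c => a + pvDelta c) cd cs).getLast?.getD 0 ≠ 0 then -1
       else (List.scanl (fun a c => a + pvDelta c) cd cs).foldl max md) := by
  induction cs with
  | nil =>
    intro cd md h0 hle
    simp only [pvGoA, List.scanl_nil, List.foldl_cons, List.foldl_nil, List.getLast?_singleton]
    rcases eq_or_ne cd 0 with rfl | hne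
    · simp [max_eq_left hle]
    · simp [hne]
  | cons c cs ih =>
    intro cd md h0 hle
    -- peel the head cd off the depth sequence on the RHS
    rw [scanl_getLast?_cons, List.scanl_cons, List.foldl_cons, List.foldl_cons, min_self,
        max_eq_left hle]
    simp only [pvGoA]
    by_cases hob : c = '{'
    · subst hob
      rw [if_pos rfl, ih (cd + 1) (max md (cd + 1)) (by omega) (le_max_right _ _)]
      simp only [show ∀ a : Int, (fun a c => a + pvDelta c) a '{' = a + 1 from fun a => rfl]
      rw [foldl_max_scanl_seed (fun a c => a + pvDelta c) (cd + 1) md cs]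
      simp only [foldl_min_neg_congr (List.scanl (fun a c => a + pvDelta c) (cd + 1) cs)
        (cd + 1) cd (by omega) h0]
    · by_cases hcb : c = '}'
      · subst hcb
        rw [if_neg hob, if_pos rfl]
        simp only [show ∀ a : Int, (fun a c => a + pvDelta c) a '}' = a - 1 from fun a => by
          show a + pvDelta '}' = a - 1; simp [pvDelta]; ring]
        by_cases hund : cd - 1 < 0
        · rw [if_pos hund, if_pos (Or.inl (by
            calc (List.scanl (fun a c => a + pvDelta c) (cd - 1) cs).foldl min cd
                ≤ cd - 1 := foldl_min_scanl_seed_le _ _ _ _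
              _ < 0 := hund))]
        · rw [if_neg hund, ih (cd - 1) md (by omega) (by omega)]
          simp only [foldl_min_neg_congr (List.scanl (fun a c => a + pvDelta c) (cd - 1) cs)
            (cd - 1) cd (by omega) h0]
      · rw [if_neg hob, if_neg hcb, ih cd md h0 hle]
        simp only [show (fun a c => a + pvDelta c) cd c = cd from by
          show cd + pvDelta c = cd; simp [pvDelta, hob, hcb]]

-- ===== VERDICT (by name: the statement is the Claim_ definition above) =====
theorem max_depth_of_nested_braces_spec : Claim_equal_max_depth_of_nested_braces := by
  intro s _
  unfold Spec_max_depth_of_nested_braces max_depth_of_nested_braces max_depth_of_nested_braces_alt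
  exact goA_eq s.toList 0 0 le_rfl le_rfl
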